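-- pv_equiv track=rewrite | github.com/conanbke-ai/BKE | Algorism/Python/Inflearn/CodingTest/05.정다면체.py | solution
-- ===== SOURCE A (Python) =====
-- def solution(N, M):
--     freq = dict()
--
--     # 주사위 눈 합 계산
--     for i in range(1, N + 1):
--         for j in range(1, M + 1):
--             s = i + j
--             freq[s] = freq.get(s, 0) + 1
--
--     # 가장 많이 나온 횟수
--     max_cnt = max(freq.values())
--
--     # 그 횟수를 가진 합(키)들을 오름차순으로 반환
--     result = [k for k, v in freq.items() if v == max_cnt]
--
--     return sorted(result)
-- ===== SOURCE B (Python) =====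
-- def solution(N, M):
--     # closed form: the most frequent sums of an N-die and an M-die form the
--     # plateau min(N,M)+1 .. max(N,M)+1
--     if N < 1 or M < 1:
--         raise ValueError("dice must have at least one face")
--     return list(range(min(N, M) + 1, max(N, M) + 2))
-- ===== Notes on version B (the rewrite author's own statement) =====
-- stated objective: faster
-- what changed: replaces the O(N*M) dice-sum counting dict, max scan and sort by the closed-form plateau range(min(N,M)+1, max(N,M)+2)
import Mathlib
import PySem

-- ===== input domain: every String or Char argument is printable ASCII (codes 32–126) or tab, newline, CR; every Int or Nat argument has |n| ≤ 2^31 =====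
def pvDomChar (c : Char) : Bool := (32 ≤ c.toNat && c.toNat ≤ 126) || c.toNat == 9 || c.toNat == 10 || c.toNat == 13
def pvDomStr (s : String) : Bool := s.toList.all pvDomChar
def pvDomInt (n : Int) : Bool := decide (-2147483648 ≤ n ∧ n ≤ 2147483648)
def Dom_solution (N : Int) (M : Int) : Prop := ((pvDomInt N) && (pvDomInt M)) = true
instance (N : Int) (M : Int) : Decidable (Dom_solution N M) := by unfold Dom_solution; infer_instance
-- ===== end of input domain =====

-- B replaces A's O(N*M) dice-sum counting dict + max scan + sort by the closed-form
-- plateau range(min(N,M)+1, max(N,M)+2); equivalence proved for N ≥ 1, M ≥ 1.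

-- ===== PORT A =====
def solution (N : Int) (M : Int) : List Int :=
  let freq : PySem.Dict Int Int :=
    (PySem.List.pyRange 1 (N + 1)).foldl
      (fun d i =>
        (PySem.List.pyRange 1 (M + 1)).foldl
          (fun d j => d.insert (i + j) (d.getD (i + j) 0 + 1)) d)
      PySem.Dict.empty
  match PySem.List.max? freq.values (fun v => v) with
  | none => []  -- Python's max() raises ValueError here (empty dict); excluded by Pre_solution
  | some maxCnt =>
      PySem.List.sorted ((freq.items.filter (fun p => p.2 == maxCnt)).map (fun p => p.1)) (fun k => k)

-- ===== PORT B =====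
def solution_alt (N : Int) (M : Int) : List Int :=
  if N < 1 ∨ M < 1 then []  -- Python B raises ValueError here; excluded by Pre_solution
  else PySem.List.pyRange (min N M + 1) (max N M + 2)

-- ===== PRECONDITION & SPEC =====
-- Pre_ excludes N < 1 or M < 1, where A's dict stays empty and max() raises ValueError.
def Pre_solution (N : Int) (M : Int) : Prop := 1 ≤ N ∧ 1 ≤ M
instance (N : Int) (M : Int) : Decidable (Pre_solution N M) := by unfold Pre_solution; infer_instance
def pvWitness_solution : Int × Int := (2, 3)

def Spec_solution (N : Int) (M : Int) (out : List Int) : Prop := out = solution_alt N M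
instance (N : Int) (M : Int) (out : List Int) : Decidable (Spec_solution N M out) := by unfold Spec_solution; infer_instance

-- ===== CLAIM (what is proved, stated in full; the proofs are below) =====
def Claim_equal_solution : Prop := ∀ (N : Int) (M : Int), Dom_solution N M → Pre_solution N M → Spec_solution N M (solution N M)

-- ===== LEMMAS AND PROOFS =====

-- the multiset of all dice sums i+j, 1 ≤ i ≤ N, 1 ≤ j ≤ M, in A's generation order
def pvL (N M : Int) : List Int :=
  (PySem.List.pyRange 1 (N + 1)).flatMap (fun i => (PySem.List.pyRange 1 (M + 1)).map (fun j => i + j))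

lemma count_pyRange (x : Int) : ∀ (n : Nat) (a b : Int), (b - a).toNat = n →
    (PySem.List.pyRange a b).count x = if a ≤ x ∧ x < b then 1 else 0 := by
  intro n
  induction n with
  | zero =>
    intro a b h
    have : PySem.List.pyRange a b = [] := by simp [PySem.List.pyRange]; omega
    rw [this]; simp; omega
  | succ k ih =>
    intro a b h
    have hab : a < b := by omega
    rw [PySem.List.pyRange_one_cons hab, List.count_cons, ih (a + 1) b (by omega)]
    by_cases hx : x = a <;> split_ifs <;> simp_all <;> omega

lemma countP_pyRange_interval (lo hi : Int) : ∀ (n : Nat) (a b : Int), (b - a).toNat = n →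
    (PySem.List.pyRange a b).countP (fun i => decide (lo ≤ i ∧ i ≤ hi)) = (min b (hi + 1) - max a lo).toNat := by
  intro n
  induction n with
  | zero =>
    intro a b h
    have : PySem.List.pyRange a b = [] := by simp [PySem.List.pyRange]; omega
    rw [this]; simp; omega
  | succ k ih =>
    intro a b h
    have hab : a < b := by omega
    rw [PySem.List.pyRange_one_cons hab, List.countP_cons, ih (a + 1) b (by omega)]
    by_cases hx : lo ≤ a ∧ a ≤ hi <;> simp [hx] <;> omega

lemma pairwise_pyRange : ∀ (n : Nat) (a b : Int), (b - a).toNat = n →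
    (PySem.List.pyRange a b).Pairwise (· < ·) := by
  intro n
  induction n with
  | zero =>
    intro a b h
    have : PySem.List.pyRange a b = [] := by simp [PySem.List.pyRange]; omega
    rw [this]; simp
  | succ k ih =>
    intro a b h
    have hab : a < b := by omega
    rw [PySem.List.pyRange_one_cons hab]
    refine List.Pairwise.cons ?_ (ih (a + 1) b (by omega))
    intro y hy
    have := PySem.List.mem_pyRange_one.mp hy
    omega

lemma count_map_add (i s : Int) (l : List Int) : (l.map (fun j => i + j)).count s = l.count (s - i) := by
  simp only [List.count, List.countP_map]
  apply List.countP_congr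
  intro x _
  simp only [Function.comp_apply, beq_iff_eq]
  omega

-- A's nested loop builds exactly Counter(pvL N M)
lemma freq_eq (N M : Int) :
    (PySem.List.pyRange 1 (N + 1)).foldl
      (fun d i =>
        (PySem.List.pyRange 1 (M + 1)).foldl
          (fun d j => d.insert (i + j) (d.getD (i + j) 0 + 1)) d)
      PySem.Dict.empty
    = PySem.Dict.counter (pvL N M) := by
  rw [← PySem.Dict.foldl_insert_getD_add_one_eq_counter, pvL, List.foldl_flatMap]
  congr 1
  funext d i
  rw [List.foldl_map]

-- the closed-form frequency of sum s
lemma count_L (N M s : Int) : (pvL N M).count s = (min (N + 1) s - max 1 (s - M)).toNat := by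
  rw [pvL, List.count_flatMap]
  rw [List.map_congr_left (g := fun i => if (fun i => decide (s - M ≤ i ∧ i ≤ s - 1)) i = true then 1 else 0)
    (by
      intro i _
      simp only [Function.comp_apply]
      rw [count_map_add, count_pyRange (s - i) ((M + 1) - 1).toNat 1 (M + 1) rfl]
      simp only [decide_eq_true_eq]
      split_ifs <;> omega)]
  rw [PySem.List.sum_map_ite_one_zero_nat, countP_pyRange_interval (s - M) (s - 1) ((N + 1) - 1).toNat 1 (N + 1) rfl]
  omega

-- ===== VERDICT (by name: the statement is the Claim_ definition above) =====
theorem solution_spec : Claim_equal_solution := by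
  intro N M _ hpre
  obtain ⟨hN, hM⟩ := hpre
  unfold Spec_solution
  simp only [solution, solution_alt, freq_eq]
  rw [if_neg (by omega : ¬(N < 1 ∨ M < 1))]
  set C := PySem.Dict.counter (pvL N M) with hC
  set a : Int := min N M with ha
  set b : Int := max N M with hb
  have hvals : C.values = (PySem.Set.ofList (pvL N M)).map (fun k => ((pvL N M).count k : Int)) := by
    rw [hC]
    simp only [PySem.Dict.values, PySem.Dict.items_counter, List.map_map]
    rfl
  -- a is attained at sum a+1
  have hmemL : a + 1 ∈ pvL N M := by
    rw [← List.count_pos_iff, count_L]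
    omega
  have hamem : (a : Int) ∈ C.values := by
    rw [hvals]
    refine List.mem_map.mpr ⟨a + 1, (PySem.Set.mem_ofList _ _).mpr hmemL, ?_⟩
    rw [count_L]
    omega
  have hub : ∀ y ∈ C.values, y ≤ (a : Int) := by
    rw [hvals]
    intro y hy
    obtain ⟨k, _, rfl⟩ := List.mem_map.mp hy
    rw [count_L]
    omega
  -- the max of the values is a
  cases hmx : PySem.List.max? C.values (fun v => v) with
  | none =>
    rw [PySem.List.max?_eq_none_iff] at hmx
    rw [hmx] at hamem
    exact absurd hamem (List.not_mem_nil)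
  | some m =>
    have hm : m = a :=
      le_antisymm (hub m (PySem.List.max?_mem hmx))
        (PySem.List.max?_isMax hmx (a : Int) hamem)
    subst hm
    dsimp only
    -- the list of keys with maximal count
    have hkeys : (C.items.filter (fun p => p.2 == (a : Int))).map (fun p => p.1)
        = (PySem.Set.ofList (pvL N M)).filter (fun k => ((pvL N M).count k : Int) == a) := by
      rw [hC, PySem.Dict.items_counter, List.filter_map, List.map_map]
      simp [Function.comp_def]
    rw [hkeys]
    apply PySem.List.sorted_eq_of_perm_of_pairwise_lt _ _ _ ?_ ?_
    · rw [List.perm_ext_iff_of_nodup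
        ((pairwise_pyRange (b + 2 - (a + 1)).toNat (a + 1) (b + 2) rfl).imp ne_of_lt)
        (List.Nodup.filter _ (PySem.Set.nodup_ofList _))]
      intro x
      rw [PySem.List.mem_pyRange_one, List.mem_filter]
      rw [PySem.Set.mem_ofList, ← List.count_pos_iff (a := x), count_L]
      simp only [beq_iff_eq]
      constructor
      · intro h
        refine ⟨by omega, by omega⟩
      · intro ⟨h1, h2⟩
        omega
    · exact pairwise_pyRange (b + 2 - (a + 1)).toNat (a + 1) (b + 2) rfl
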